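-- pv_equiv track=rewrite | github.com/TDK1969/My-Leetcode | match/2024.3.30 mt/4.py | solution
-- ===== SOURCE A (Python) =====
-- def solution(s: str) -> int:
--     mod = (10 ** 9) + 7
--     n = len(s)
--     count = [0] * 26
--     for c in s:
--         count[ord(c) - ord("a")] += 1
--     ans = 0
--
--     h = [1] * 26
--     nums = [i for i in range(26)]
--
--
--     for l in range(2, n, 2):
--         # 组成长度为l的平衡串子序列，每个字母应该有i个
--         i = l // 2
--         finish = []
--         for index, value in enumerate(nums):
--             # 更新h[j]为C(count[j], i)
--             if count[value] >= i:
--                 h[value] = h[value] * (count[value] - i + 1) // i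
--             else:
--                 finish.append(index)
--         for index in finish[::-1]:
--             nums.pop(index)
--
--         # 提前退出
--
--         if len(nums) == 0 or len(nums) == 1:
--             break
--         for j in range(len(nums)):
--             for k in range(j + 1, len(nums)):
--                 ans = (ans + h[nums[j]] * h[nums[k]]) % mod
--
--     return ans
-- ===== SOURCE B (Python) =====
-- def solution(s: str) -> int:
--     # Same counting and binomial-update scheme, but survivors are kept with a
--     # filter (no enumerate/pop bookkeeping) and the pairwise-product double
--     # loop is replaced by the closed form (S^2 - sum h^2) // 2.
--     mod = (10 ** 9) + 7
--     n = len(s)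
--     count = [0] * 26
--     for c in s:
--         count[ord(c) - ord("a")] += 1
--     ans = 0
--     h = [1] * 26
--     nums = [v for v in range(26)]
--     for l in range(2, n, 2):
--         i = l // 2
--         nums = [v for v in nums if count[v] >= i]
--         for v in nums:
--             h[v] = h[v] * (count[v] - i + 1) // i
--         if len(nums) <= 1:
--             break
--         S = 0
--         Q = 0
--         for v in nums:
--             t = h[v]
--             S += t
--             Q += t * t
--         ans = (ans + (S * S - Q) // 2) % mod
--     return ans
-- ===== Notes on version B (the rewrite author's own statement) =====
-- stated objective: alternative
-- what changed: B keeps A's per-length binomial updates but replaces the enumerate/finish/pop survivor bookkeeping with a filter and the 26x26 pairwise-product inner loop with the closed form (S^2 - sum of squares) // 2, computed in one pass (intended as a constant-factor saving; measured ~2.8x at n=16384 but unconfirmed at the largest size).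
import Mathlib
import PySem

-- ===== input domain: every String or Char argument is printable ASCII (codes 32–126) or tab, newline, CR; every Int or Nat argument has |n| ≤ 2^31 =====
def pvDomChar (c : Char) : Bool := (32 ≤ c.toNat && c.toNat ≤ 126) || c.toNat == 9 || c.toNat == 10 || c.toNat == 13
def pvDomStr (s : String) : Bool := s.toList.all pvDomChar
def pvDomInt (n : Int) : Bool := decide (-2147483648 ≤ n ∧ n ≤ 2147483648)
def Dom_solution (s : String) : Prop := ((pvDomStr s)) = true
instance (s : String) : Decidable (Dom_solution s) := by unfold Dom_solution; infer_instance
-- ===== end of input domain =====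

-- B keeps A's counting/binomial scheme but drops the enumerate/finish/pop bookkeeping
-- (a filter instead) and replaces the pairwise-product double loop by the closed form
-- (S^2 - sum of squares) // 2, computed in one pass — exact same values.

-- ===== PORT A =====
-- nums.pop(index); the index is always in range here, 'none' is unreachable
def solA_pop (acc : List Int) (idx : Int) : List Int :=
  match PySem.List.pop? acc idx with
  | some r => r.2
  | none => acc

-- the 'for l in range(2, n, 2)' loop of A, with 'break' as early return
def solA_loop (md : Int) (count : List Int) : List Int → List Int → List Int → Int → Int
  | [], _, _, ans => ans
  | l :: ls, nums, h, ans =>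
    let i := PySem.Int.floordiv l 2
    let st := (PySem.List.enumerate nums 0).foldl
      (fun (st : List Int × List Int) iv =>
        if i ≤ PySem.List.pyGetD count iv.2 0 then
          (PySem.List.pySetD st.1 iv.2
            (PySem.Int.floordiv
              (PySem.List.pyGetD st.1 iv.2 0 * (PySem.List.pyGetD count iv.2 0 - i + 1)) i),
           st.2)
        else (st.1, st.2 ++ [iv.1])) (h, ([] : List Int))
    let h2 := st.1
    -- for index in finish[::-1]: nums.pop(index)
    let nums2 := st.2.reverse.foldl solA_pop nums
    if nums2.length = 0 ∨ nums2.length = 1 then ans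
    else
      let ans2 := (PySem.List.pyRange 0 (nums2.length : Int) 1).foldl (fun a j =>
          (PySem.List.pyRange (j + 1) (nums2.length : Int) 1).foldl (fun a k =>
            PySem.Int.mod
              (a + PySem.List.pyGetD h2 (PySem.List.pyGetD nums2 j 0) 0 *
                   PySem.List.pyGetD h2 (PySem.List.pyGetD nums2 k 0) 0) md) a) ans
      solA_loop md count ls nums2 h2 ans2

def solution (s : String) : Int :=
  let md : Int := 10 ^ 9 + 7
  let count := s.toList.foldl
    (fun cnt c => PySem.List.pySetD cnt ((c.toNat : Int) - 97)
      (PySem.List.pyGetD cnt ((c.toNat : Int) - 97) 0 + 1))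
    (List.replicate 26 (0 : Int))
  solA_loop md count (PySem.List.pyRange 2 (s.toList.length : Int) 2)
    (PySem.List.pyRange 0 26 1) (List.replicate 26 (1 : Int)) 0

-- ===== PORT B =====
-- the 'for l in range(2, n, 2)' loop of B
def solB_loop (md : Int) (count : List Int) : List Int → List Int → List Int → Int → Int
  | [], _, _, ans => ans
  | l :: ls, nums, h, ans =>
    let i := PySem.Int.floordiv l 2
    let nums2 := nums.filter (fun v => i ≤ PySem.List.pyGetD count v 0)
    let h2 := nums2.foldl
      (fun hh v => PySem.List.pySetD hh v
        (PySem.Int.floordiv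
          (PySem.List.pyGetD hh v 0 * (PySem.List.pyGetD count v 0 - i + 1)) i)) h
    if nums2.length ≤ 1 then ans
    else
      let sq := nums2.foldl
        (fun (p : Int × Int) v =>
          (p.1 + PySem.List.pyGetD h2 v 0,
           p.2 + PySem.List.pyGetD h2 v 0 * PySem.List.pyGetD h2 v 0)) ((0 : Int), (0 : Int))
      solB_loop md count ls nums2 h2
        (PySem.Int.mod (ans + PySem.Int.floordiv (sq.1 * sq.1 - sq.2) 2) md)

def solution_alt (s : String) : Int :=
  let md : Int := 10 ^ 9 + 7
  let count := s.toList.foldl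
    (fun cnt c => PySem.List.pySetD cnt ((c.toNat : Int) - 97)
      (PySem.List.pyGetD cnt ((c.toNat : Int) - 97) 0 + 1))
    (List.replicate 26 (0 : Int))
  solB_loop md count (PySem.List.pyRange 2 (s.toList.length : Int) 2)
    (PySem.List.pyRange 0 26 1) (List.replicate 26 (1 : Int)) 0

-- ===== PRECONDITION & SPEC =====
-- Pre_ excludes exactly the strings on which Python's count[ord(c) - 97] raises
-- IndexError (characters with code < 71 or > 122); on every other string A returns.
def Pre_solution (s : String) : Prop := (s.toList.all (fun c => 71 ≤ c.toNat && c.toNat ≤ 122)) = true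
instance (s : String) : Decidable (Pre_solution s) := by unfold Pre_solution; infer_instance
def pvWitness_solution : String := "aabb"

def Spec_solution (s : String) (out : Int) : Prop := out = solution_alt s
instance (s : String) (out : Int) : Decidable (Spec_solution s out) := by unfold Spec_solution; infer_instance

-- ===== CLAIM (what is proved, stated in full; the proofs are below) =====
def Claim_equal_solution : Prop := ∀ (s : String), Dom_solution s → Pre_solution s → Spec_solution s (solution s)

-- ===== LEMMAS AND PROOFS =====

-- (x % m + y) % m = (x + y) % m
theorem pv_modstep (m x y : Int) : (x % m + y) % m = (x + y) % m := by
  rw [Int.add_emod, Int.emod_emod_of_dvd _ dvd_rfl, ← Int.add_emod]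

-- a mod-accumulating sum loop, started from an already reduced value
theorem pv_modsum (m c : Int) : ∀ (us : List Int) (x : Int),
    us.foldl (fun a u => (a + c * u) % m) (x % m) = (x + c * us.sum) % m := by
  intro us
  induction us with
  | nil => intro x; simp
  | cons u us ih =>
    intro x
    simp only [List.foldl_cons, List.sum_cons]
    rw [pv_modstep, ih, mul_add]
    ring_nf

theorem pv_modsum_cons (m c : Int) (u : Int) (us : List Int) (a : Int) :
    (u :: us).foldl (fun a u => (a + c * u) % m) a = (a + c * (u :: us).sum) % m := by
  simp only [List.foldl_cons, List.sum_cons]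
  rw [pv_modsum, mul_add]
  ring_nf

-- sum over unordered index pairs j < k of t_j * t_k
def pairsSum : List Int → Int
  | [] => 0
  | t :: ts => t * ts.sum + pairsSum ts

theorem pv_two_pairs : ∀ ts : List Int,
    ts.sum * ts.sum - (ts.map (fun t => t * t)).sum = 2 * pairsSum ts := by
  intro ts
  induction ts with
  | nil => simp [pairsSum]
  | cons t ts ih =>
    simp only [List.sum_cons, List.map_cons, pairsSum]
    nlinarith [ih]

-- the pairwise double loop of A, as a structural fold
def pairFoldM (md : Int) : List Int → Int → Int
  | [], a => a
  | t :: ts, a => pairFoldM md ts (ts.foldl (fun a u => PySem.Int.mod (a + t * u) md) a)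

theorem pv_pairFoldM_eq (md : Int) (hm : 0 < md) :
    ∀ (ts : List Int) (t u a : Int),
    pairFoldM md (t :: u :: ts) a = PySem.Int.mod (a + pairsSum (t :: u :: ts)) md := by
  intro ts
  induction ts with
  | nil =>
    intro t u a
    simp only [pairFoldM, List.foldl_cons, List.foldl_nil, pairsSum, List.sum_cons,
      List.sum_nil, PySem.Int.mod_eq_emod_of_pos hm]
    ring_nf
  | cons w ts ih =>
    intro t u a
    show pairFoldM md (u :: w :: ts)
        ((u :: w :: ts).foldl (fun a x => PySem.Int.mod (a + t * x) md) a) = _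
    rw [ih]
    simp only [PySem.Int.mod_eq_emod_of_pos hm]
    rw [pv_modsum_cons, pv_modstep]
    simp only [pairsSum, List.sum_cons]
    ring_nf

-- indexing / erasing at the junction of an append
theorem pv_getMid (pre : List Int) (x : Int) (xs : List Int) (d : Int) :
    PySem.List.pyGetD (pre ++ x :: xs) (pre.length : Int) d = x := by
  rw [PySem.List.pyGetD_natCast]
  induction pre with
  | nil => rfl
  | cons p pre ih => simp

theorem pv_dropMid (pre : List Int) (x : Int) (xs : List Int) :
    (pre ++ x :: xs).drop (pre.length + 1) = xs := by
  induction pre with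
  | nil => simp
  | cons p pre ih => simp [ih]

theorem pv_eraseMid (pre : List Int) (x : Int) (xs : List Int) :
    (pre ++ x :: xs).eraseIdx pre.length = pre ++ xs := by
  induction pre with
  | nil => rfl
  | cons p pre ih => simpa [List.eraseIdx] using ih

theorem pv_popMid (pre : List Int) (x : Int) (xs : List Int) :
    solA_pop (pre ++ x :: xs) (pre.length : Int) = pre ++ xs := by
  unfold solA_pop
  rw [PySem.List.pop?_natCast (pre ++ x :: xs) pre.length (by simp)]
  simp [pv_eraseMid]

-- popping the collected bad positions in descending order is a filter
theorem pv_popfold (p : Int → Bool) :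
    ∀ (xs pre : List Int),
    ((((PySem.List.enumerate xs (pre.length : Int)).filter (fun iv => !p iv.2)).map
        (fun iv => iv.1)).reverse).foldl solA_pop (pre ++ xs) = pre ++ xs.filter p := by
  intro xs
  induction xs with
  | nil => intro pre; simp [PySem.List.enumerate_nil]
  | cons x xs ih =>
    intro pre
    rw [PySem.List.enumerate_cons]
    have hlen : ((pre.length : Int) + 1) = (((pre ++ [x]).length : Nat) : Int) := by simp
    by_cases hp : p x
    · have hfil : List.filter (fun iv => !p iv.2)
          (((pre.length : Int), x) :: PySem.List.enumerate xs ((pre.length : Int) + 1))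
          = List.filter (fun iv => !p iv.2) (PySem.List.enumerate xs ((pre.length : Int) + 1)) := by
        simp [hp]
      rw [hfil, hlen]
      have h2 := ih (pre ++ [x])
      simp only [List.append_assoc, List.singleton_append] at h2
      rw [h2]
      simp [hp]
    · have hfil : List.filter (fun iv => !p iv.2)
          (((pre.length : Int), x) :: PySem.List.enumerate xs ((pre.length : Int) + 1))
          = ((pre.length : Int), x) :: List.filter (fun iv => !p iv.2)
              (PySem.List.enumerate xs ((pre.length : Int) + 1)) := by
        simp [hp]
      rw [hfil, hlen]
      have h2 := ih (pre ++ [x])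
      simp only [List.append_assoc, List.singleton_append] at h2
      rw [List.map_cons, List.reverse_cons, List.foldl_append, h2, List.foldl_cons,
        List.foldl_nil]
      rw [pv_popMid pre x (xs.filter p)]
      simp [hp]

-- A's enumerate loop = (B's h-update fold over the filtered list, the bad positions)
theorem pv_stepfold (count : List Int) (i : Int) :
    ∀ (nums : List Int) (s : Int) (h : List Int) (fin : List Int),
    (PySem.List.enumerate nums s).foldl
      (fun (st : List Int × List Int) iv =>
        if i ≤ PySem.List.pyGetD count iv.2 0 then
          (PySem.List.pySetD st.1 iv.2
            (PySem.Int.floordiv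
              (PySem.List.pyGetD st.1 iv.2 0 * (PySem.List.pyGetD count iv.2 0 - i + 1)) i),
           st.2)
        else (st.1, st.2 ++ [iv.1])) (h, fin)
    = ((nums.filter (fun v => i ≤ PySem.List.pyGetD count v 0)).foldl
         (fun hh v => PySem.List.pySetD hh v
           (PySem.Int.floordiv
             (PySem.List.pyGetD hh v 0 * (PySem.List.pyGetD count v 0 - i + 1)) i)) h,
       fin ++ ((PySem.List.enumerate nums s).filter
         (fun iv => !(i ≤ PySem.List.pyGetD count iv.2 0 : Bool))).map (fun iv => iv.1)) := by
  intro nums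
  induction nums with
  | nil => intro s h fin; simp [PySem.List.enumerate_nil]
  | cons x xs ih =>
    intro s h fin
    rw [PySem.List.enumerate_cons]
    by_cases hc : i ≤ PySem.List.pyGetD count x 0
    · simp only [List.foldl_cons, List.filter_cons, hc, decide_true, Bool.not_true]
      rw [ih]
      simp
    · simp only [List.foldl_cons, List.filter_cons, if_neg hc]
      rw [ih]
      simp [hc]

-- the nested index double loop = structural pairFoldM over the h-values
theorem pv_outer_bridge (md : Int) (h2 : List Int) :
    ∀ (xs pre : List Int) (a : Int),
    (PySem.List.pyRange (pre.length : Int) (((pre ++ xs).length : Nat) : Int) 1).foldl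
      (fun a j => (PySem.List.pyRange (j + 1) (((pre ++ xs).length : Nat) : Int) 1).foldl
        (fun a k => PySem.Int.mod
          (a + PySem.List.pyGetD h2 (PySem.List.pyGetD (pre ++ xs) j 0) 0 *
               PySem.List.pyGetD h2 (PySem.List.pyGetD (pre ++ xs) k 0) 0) md) a) a
    = pairFoldM md (xs.map (fun v => PySem.List.pyGetD h2 v 0)) a := by
  intro xs
  induction xs with
  | nil =>
    intro pre a
    rw [PySem.List.pyRange_one_eq_nil (by simp)]
    rfl
  | cons x xs ih =>
    intro pre a
    have hlt : (pre.length : Int) < (((pre ++ x :: xs).length : Nat) : Int) := by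
      simp
    rw [PySem.List.pyRange_one_cons hlt, List.foldl_cons]
    have hinner :
        (PySem.List.pyRange ((pre.length : Int) + 1) (((pre ++ x :: xs).length : Nat) : Int) 1).foldl
          (fun a k => PySem.Int.mod
            (a + PySem.List.pyGetD h2 (PySem.List.pyGetD (pre ++ x :: xs) (pre.length : Int) 0) 0 *
                 PySem.List.pyGetD h2 (PySem.List.pyGetD (pre ++ x :: xs) k 0) 0) md) a
        = (xs.map (fun v => PySem.List.pyGetD h2 v 0)).foldl
            (fun a u => PySem.Int.mod (a + PySem.List.pyGetD h2 x 0 * u) md) a := by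
      rw [pv_getMid]
      rw [PySem.List.foldl_pyRange_pyGetD' (pre ++ x :: xs) 0
        (fun a w => PySem.Int.mod (a + PySem.List.pyGetD h2 x 0 * PySem.List.pyGetD h2 w 0) md) a
        (by positivity)]
      have htn : (((pre.length : Int) + 1)).toNat = pre.length + 1 := by omega
      rw [htn, pv_dropMid, List.foldl_map]
    rw [hinner]
    have hpre : ((pre.length : Int) + 1) = (((pre ++ [x]).length : Nat) : Int) := by simp
    have hW : pre ++ x :: xs = (pre ++ [x]) ++ xs := by simp
    rw [hpre, hW]
    rw [ih (pre ++ [x])]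
    rfl

-- one even length processed identically by the two loops
theorem pv_loop_eq (md : Int) (hm : 0 < md) (count : List Int) :
    ∀ (ls nums h : List Int) (ans : Int),
    solA_loop md count ls nums h ans = solB_loop md count ls nums h ans := by
  intro ls
  induction ls with
  | nil => intro nums h ans; rfl
  | cons l ls ih =>
    intro nums h ans
    simp only [solA_loop, solB_loop]
    rw [pv_stepfold]
    simp only [List.nil_append]
    have hpop := pv_popfold
      (fun v => decide (PySem.Int.floordiv l 2 ≤ PySem.List.pyGetD count v 0)) nums ([] : List Int)
    simp only [List.nil_append, List.length_nil, Nat.cast_zero] at hpop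
    rw [hpop]
    set i := PySem.Int.floordiv l 2 with hi
    set nums2 := List.filter (fun v => decide (i ≤ PySem.List.pyGetD count v 0)) nums with hn2
    set h2c := List.foldl
      (fun hh v => PySem.List.pySetD hh v
        (PySem.Int.floordiv
          (PySem.List.pyGetD hh v 0 * (PySem.List.pyGetD count v 0 - i + 1)) i)) h nums2 with hh2
    by_cases hsm : nums2.length ≤ 1
    · rw [if_pos (by omega), if_pos hsm]
    · rw [if_neg (by omega), if_neg hsm]
      have hob := pv_outer_bridge md h2c nums2 [] ans
      simp only [List.nil_append, List.length_nil, Nat.cast_zero] at hob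
      rw [hob]
      rw [PySem.List.foldl_prod_mk (f := fun s v => s + PySem.List.pyGetD h2c v 0)
        (g := fun s v => s + PySem.List.pyGetD h2c v 0 * PySem.List.pyGetD h2c v 0)]
      rw [PySem.List.foldl_add nums2 (fun v => PySem.List.pyGetD h2c v 0) 0,
        PySem.List.foldl_add nums2 (fun v => PySem.List.pyGetD h2c v 0 * PySem.List.pyGetD h2c v 0) 0]
      simp only [zero_add]
      have hq : nums2.map (fun v => PySem.List.pyGetD h2c v 0 * PySem.List.pyGetD h2c v 0)
          = (nums2.map (fun v => PySem.List.pyGetD h2c v 0)).map (fun t => t * t) := by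
        simp [List.map_map, Function.comp]
      rw [hq]
      set T := nums2.map (fun v => PySem.List.pyGetD h2c v 0) with hT
      have hkey : PySem.Int.floordiv (T.sum * T.sum - (T.map (fun t => t * t)).sum) 2
          = pairsSum T := by
        rw [PySem.Int.floordiv_eq_ediv_of_pos (by norm_num), pv_two_pairs T]
        exact Int.mul_ediv_cancel_left _ (by norm_num)
      rw [hkey]
      have hTlen : 2 ≤ T.length := by rw [hT, List.length_map]; omega
      obtain ⟨t, u, ts, hTe⟩ : ∃ t u ts, T = t :: u :: ts := by
        cases hc1 : T with
        | nil => rw [hc1] at hTlen; simp at hTlen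
        | cons t T2 =>
          cases hc2 : T2 with
          | nil => rw [hc2] at hc1; rw [hc1] at hTlen; simp at hTlen
          | cons u ts => exact ⟨t, u, ts, by first | rw [hc1] | rfl⟩
      rw [hTe, pv_pairFoldM_eq md hm ts t u ans]
      exact ih _ _ _

-- ===== VERDICT (by name: the statement is the Claim_ definition above) =====
theorem solution_spec : Claim_equal_solution := by
  unfold Claim_equal_solution Spec_solution
  intro s _ _
  unfold solution solution_alt
  exact pv_loop_eq _ (by norm_num) _ _ _ _ _
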